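-- pv_equiv track=rewrite | github.com/MelvinBerkoh/CS100 | CodeWarsInPy/ReverseFizzBuss.py | reverse_fizzbuzz
-- ===== SOURCE A (Python) =====
-- def reverse_fizzbuzz(str):
--
--   # split the passed parameter in to an array separating it by space for each word or number in it
--     array = str.split()
--     # hold the results to return
--     result = []
--
--     # loop through the array by index
--     for i in range(len(array)):
--       # now we check for the key words
--         if array[i] == 'Fizz':
--           # now we want to check if there is a number before and after the word fizz
--
--           # if the index is 0 and the next word following is buzz we know that we have to add 5 to the results array
--             if i == 0 and array[i + 1] == 'Buzz':
--                 result.append(5)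
--             # if the index is 0 and the next word following is not buzz we know that we have to add 3 to the results array
--             elif i == 0 and array[i + 1] != 'Buzz':
--                 result.append(3)
--             # if there is a number before and after the word fizz we have to
--     return result
-- ===== SOURCE B (Python) =====
-- def reverse_fizzbuzz(str):
--     tokens = str.split()
--     if tokens[:1] != ['Fizz']:
--         return []
--     return [5] if tokens[1:2] == ['Buzz'] else [3]
-- ===== Notes on version B (the rewrite author's own statement) =====
-- stated objective: simpler
-- what changed: B drops A's index loop entirely: since A only ever acts when i==0 and the first token is 'Fizz', B splits once and decides directly from the first two tokens via slices, with no loop and no indexing.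
-- outside the precondition, e.g. on reverse_fizzbuzz('Fizz'): A raises IndexError, B returns [3]
import Mathlib
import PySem

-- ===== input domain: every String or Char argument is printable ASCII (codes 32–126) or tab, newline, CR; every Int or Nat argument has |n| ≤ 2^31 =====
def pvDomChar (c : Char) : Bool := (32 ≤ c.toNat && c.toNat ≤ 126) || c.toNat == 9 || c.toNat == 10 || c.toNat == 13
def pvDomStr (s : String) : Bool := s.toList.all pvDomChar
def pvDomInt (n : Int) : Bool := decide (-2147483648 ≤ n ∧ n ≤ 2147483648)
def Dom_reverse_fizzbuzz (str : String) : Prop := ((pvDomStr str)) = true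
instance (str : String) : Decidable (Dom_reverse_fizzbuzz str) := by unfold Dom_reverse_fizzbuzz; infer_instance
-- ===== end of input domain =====

-- B replaces A's index loop (which only ever acts at i == 0) by a direct test of the
-- first two tokens; objective: simpler.

-- ===== PORT A =====
-- Literal transliteration of A: split, then a for-loop over range(len(array)) that
-- appends 5 or 3 only when i == 0 and array[0] == 'Fizz'.
def reverse_fizzbuzz (str : String) : List Int :=
  let array := PySem.Str.split₀ str
  let result : List Int := []
  (PySem.List.pyRange 0 (PySem.List.len array) 1).foldl (fun result i =>
    if PySem.List.pyGetD array i "" = "Fizz" then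
      if i = 0 ∧ PySem.List.pyGetD array (i + 1) "" = "Buzz" then
        result ++ [5]
      else if i = 0 ∧ PySem.List.pyGetD array (i + 1) "" ≠ "Buzz" then
        result ++ [3]
      else result
    else result) result

-- ===== PORT B =====
-- Literal transliteration of B: split, test tokens[:1] and tokens[1:2].
def reverse_fizzbuzz_alt (str : String) : List Int :=
  let tokens := PySem.Str.split₀ str
  if PySem.List.slice tokens none (some 1) ≠ ["Fizz"] then []
  else if PySem.List.slice tokens (some 1) (some 2) = ["Buzz"] then [5] else [3]

-- ===== PRECONDITION & SPEC =====
-- Pre_ excludes exactly the inputs whose split is the single token "Fizz": there A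
-- reads array[1] and raises IndexError (returns no value).
def Pre_reverse_fizzbuzz (str : String) : Prop := PySem.Str.split₀ str ≠ ["Fizz"]
instance (str : String) : Decidable (Pre_reverse_fizzbuzz str) := by unfold Pre_reverse_fizzbuzz; infer_instance
def pvWitness_reverse_fizzbuzz : String := "Fizz Buzz"

def Spec_reverse_fizzbuzz (str : String) (out : List Int) : Prop := out = reverse_fizzbuzz_alt str
instance (str : String) (out : List Int) : Decidable (Spec_reverse_fizzbuzz str out) := by unfold Spec_reverse_fizzbuzz; infer_instance

-- ===== CLAIM (what is proved, stated in full; the proofs are below) =====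
def Claim_equal_reverse_fizzbuzz : Prop := ∀ (str : String), Dom_reverse_fizzbuzz str → Pre_reverse_fizzbuzz str → Spec_reverse_fizzbuzz str (reverse_fizzbuzz str)

-- ===== LEMMAS AND PROOFS =====

-- every iteration of A's loop with index i ≥ 1 is a no-op
lemma tailLoop_id (array : List String) (a b : Int) (init : List Int) (h1 : 1 ≤ a) :
    (PySem.List.pyRange a b 1).foldl (fun result i =>
      if PySem.List.pyGetD array i "" = "Fizz" then
        if i = 0 ∧ PySem.List.pyGetD array (i + 1) "" = "Buzz" then
          result ++ [5]
        else if i = 0 ∧ PySem.List.pyGetD array (i + 1) "" ≠ "Buzz" then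
          result ++ [3]
        else result
      else result) init = init := by
  rw [PySem.List.foldl_congr_mem (g := fun acc _ => acc)]
  · simp
  · intro acc i hi
    rw [PySem.List.mem_pyRange_one] at hi
    have hne : i ≠ 0 := by omega
    simp [hne]

-- A's loop vs B's direct test, for an arbitrary token list ≠ ["Fizz"]
lemma loop_eq_direct (tok : List String) (hpre : tok ≠ ["Fizz"]) :
    (PySem.List.pyRange 0 (PySem.List.len tok) 1).foldl (fun result i =>
      if PySem.List.pyGetD tok i "" = "Fizz" then
        if i = 0 ∧ PySem.List.pyGetD tok (i + 1) "" = "Buzz" then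
          result ++ [5]
        else if i = 0 ∧ PySem.List.pyGetD tok (i + 1) "" ≠ "Buzz" then
          result ++ [3]
        else result
      else result) ([] : List Int) =
    (if PySem.List.slice tok none (some 1) ≠ ["Fizz"] then []
     else if PySem.List.slice tok (some 1) (some 2) = ["Buzz"] then [5] else [3]) := by
  cases tok with
  | nil => simp [PySem.List.pyRange_one_eq_nil, PySem.List.slice]
  | cons a rest =>
    have hlen : (0 : Int) < PySem.List.len (a :: rest) := by
      simp [PySem.List.len]
    rw [PySem.List.pyRange_one_cons hlen]
    simp only [List.foldl_cons]
    have h0 : PySem.List.pyGetD (a :: rest) 0 "" = a := by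
      simp [PySem.List.pyGetD, PySem.List.pyIdx?, PySem.List.pyGet?]
    by_cases hfz : a = "Fizz"
    · subst hfz
      cases rest with
      | nil => exact absurd rfl hpre
      | cons b rest' =>
        rw [tailLoop_id _ _ _ _ (by omega)]
        have h01 : (0:Int) ≤ (rest'.length:Int) + 1 := by positivity
        rw [PySem.List.slice_toNat]
        · by_cases hb : b = "Buzz" <;>
            simp [hb, h01, PySem.List.slice_to, PySem.List.pyGetD, PySem.List.pyIdx?, PySem.List.pyGet?]
        · norm_num
        · norm_num
    · rw [tailLoop_id _ _ _ _ (by omega)]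
      simp [h0, hfz, PySem.List.slice_to]

theorem reverse_fizzbuzz_spec : Claim_equal_reverse_fizzbuzz := by
  intro str _ hpre
  exact loop_eq_direct (PySem.Str.split₀ str) hpre
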